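-- pv_equiv track=rewrite | github.com/Sesquii/pipeline_test | Script_Factory/Script_Factory_Runs/all_runs/BATCH8/devstral-small-2507/BATCH8_PROMPT10_devstral-small-2507.py | exaggerated_word_counter
-- ===== SOURCE A (Python) =====
-- def exaggerated_word_counter(input_string):
--     """
--     Counts occurrences of each word in a string.
--     Words with length exactly 3 characters have their count exaggerated by a factor of 10.
--
--     Args:
--         input_string (str): The input string to analyze
--
--     Returns:
--         dict: A dictionary containing words as keys and their counts as values
--     """
--     # Initialize an empty dictionary to store word counts
--     word_counts = {}
--
--     # Split the input string into individual words
--     words = input_string.split()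
--
--     # Iterate through each word in the list
--     for word in words:
--         # Check if the word is already in the dictionary
--         if word in word_counts:
--             # Increment the count (exaggerated by 10x for length-3 words)
--             word_counts[word] += 10 if len(word) == 3 else 1
--         else:
--             # Add new word with initial count (exaggerated by 10x for length-3 words)
--             word_counts[word] = 10 if len(word) == 3 else 1
--
--     return word_counts
-- ===== SOURCE B (Python) =====
-- def exaggerated_word_counter(input_string):
--     # Different algorithm: no accumulator dict. Take the distinct words in
--     # first-occurrence order and compute each one's total by a full-list scan.
--     words = input_string.split()
--     return {w: (words.count(w) * 10 if len(w) == 3 else words.count(w))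
--             for w in dict.fromkeys(words)}
-- ===== Notes on version B (the rewrite author's own statement) =====
-- stated objective: alternative
-- what changed: Removes the accumulating dict entirely: B dedups the word list in first-occurrence order (dict.fromkeys) and computes each distinct word's value by a whole-list words.count(w) scan, instead of A's single-pass conditional-increment accumulation; trades O(n) for O(n*d).
import Mathlib
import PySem

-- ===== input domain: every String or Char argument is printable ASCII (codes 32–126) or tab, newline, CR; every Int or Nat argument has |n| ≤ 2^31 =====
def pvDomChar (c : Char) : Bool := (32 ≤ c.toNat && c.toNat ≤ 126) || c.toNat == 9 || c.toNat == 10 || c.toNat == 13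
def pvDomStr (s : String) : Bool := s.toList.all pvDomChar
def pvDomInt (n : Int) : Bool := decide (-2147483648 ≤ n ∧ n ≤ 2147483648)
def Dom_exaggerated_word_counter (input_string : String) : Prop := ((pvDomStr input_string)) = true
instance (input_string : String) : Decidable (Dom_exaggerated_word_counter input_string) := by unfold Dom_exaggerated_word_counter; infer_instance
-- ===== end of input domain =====

-- B drops the accumulator dict: it dedups the words (first occurrences) and counts each
-- distinct word by a whole-list scan; a different algorithm of similar size (objective: alternative).

-- ===== PORT A =====
def exaggerated_word_counter (input_string : String) : List (String × Int) :=
  let words := PySem.Str.split₀ input_string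
  let word_counts := words.foldl (fun d word =>
    if d.contains word then
      d.insert word (d.getD word 0 + (if PySem.Str.len word = 3 then 10 else 1))
    else
      d.insert word (if PySem.Str.len word = 3 then 10 else 1)) PySem.Dict.empty
  word_counts.items

-- ===== PORT B =====
def exaggerated_word_counter_alt (input_string : String) : List (String × Int) :=
  let words := PySem.Str.split₀ input_string
  (PySem.List.dedup words).map (fun w =>
    (w, if PySem.Str.len w = 3 then (words.count w : Int) * 10 else (words.count w : Int)))

-- ===== PRECONDITION & SPEC =====
def Spec_exaggerated_word_counter (input_string : String) (out : List (String × Int)) : Prop := out = exaggerated_word_counter_alt input_string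
instance (input_string : String) (out : List (String × Int)) : Decidable (Spec_exaggerated_word_counter input_string out) := by unfold Spec_exaggerated_word_counter; infer_instance

-- ===== CLAIM (what is proved, stated in full; the proofs are below) =====
def Claim_equal_exaggerated_word_counter : Prop := ∀ (input_string : String), Dom_exaggerated_word_counter input_string → Spec_exaggerated_word_counter input_string (exaggerated_word_counter input_string)

-- ===== LEMMAS AND PROOFS =====

-- A's per-word delta: 10 for length-3 words, else 1
def pvDelta (w : String) : Int := if PySem.Str.len w = 3 then 10 else 1

-- A's loop step, written uniformly as one insert
lemma stepA_eq (d : PySem.Dict String Int) (w : String) :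
    (if d.contains w then
      d.insert w (d.getD w 0 + (if PySem.Str.len w = 3 then 10 else 1))
    else
      d.insert w (if PySem.Str.len w = 3 then 10 else 1))
    = d.insert w (if d.contains w then d.getD w 0 + pvDelta w else pvDelta w) := by
  unfold pvDelta; split_ifs <;> rfl

-- value invariant of A's loop: each word accumulates pvDelta per occurrence
lemma getD_foldl_stepA (l : List String) (d : PySem.Dict String Int) (v : String) :
    (l.foldl (fun d w => d.insert w (if d.contains w then d.getD w 0 + pvDelta w else pvDelta w)) d).getD v 0
    = d.getD v 0 + pvDelta v * l.count v := by
  induction l generalizing d with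
  | nil => simp
  | cons w l ih =>
    simp only [List.foldl_cons, ih]
    rw [PySem.Dict.getD_insert]
    by_cases hv : v = w
    · subst hv
      by_cases hc : d.contains v
      · simp [hc]; ring
      · rw [PySem.Dict.getD_of_not_contains _ _ (by simpa using hc)]
        simp [hc]; ring
    · simp [hv, Ne.symm hv]

theorem exaggerated_word_counter_spec_aux (s : String) :
    exaggerated_word_counter s = exaggerated_word_counter_alt s := by
  unfold exaggerated_word_counter exaggerated_word_counter_alt
  simp only [stepA_eq]
  set words := PySem.Str.split₀ s with hw
  have hkeys : (words.foldl (fun d w => d.insert w (if d.contains w then d.getD w 0 + pvDelta w else pvDelta w)) PySem.Dict.empty).keys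
      = PySem.Set.ofList words := by
    rw [PySem.Dict.keys_foldl_insert]
    exact PySem.Set.update_nil_left words
  have hnd : (words.foldl (fun d w => d.insert w (if d.contains w then d.getD w 0 + pvDelta w else pvDelta w)) PySem.Dict.empty).keys.Nodup := by
    rw [hkeys]; exact PySem.Set.nodup_ofList words
  rw [PySem.Dict.items_eq_map_keys _ hnd 0, hkeys, PySem.List.dedup_eq_ofList]
  apply List.map_congr_left
  intro k _
  rw [getD_foldl_stepA]
  simp only [PySem.Dict.getD_empty, zero_add, pvDelta]
  split_ifs <;> ring_nf

-- ===== VERDICT (by name: the statement is the Claim_ definition above) =====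
theorem exaggerated_word_counter_spec : Claim_equal_exaggerated_word_counter := by
  intro s _
  exact exaggerated_word_counter_spec_aux s
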